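-- pv_equiv track=rewrite | github.com/iss-research-team/cnc_KG-tech_point | 3.expand-no-bert/0.dataset_make.py | get_keyword_seq
-- ===== SOURCE A (Python) =====
-- def get_keyword_seq(kw_list, s):
--     """
--     通过每一句话获取节点的邻居
--     :param s:
--     :return:
--     """
--     node_trans_list = []
--
--     for node in kw_list:
--         if node not in s:
--             continue
--         else:
--             node_length = node.count(' ') - 1
--             bit = 0
--             for i in range(s.count(node)):
--                 bit = s.find(node, bit)
--                 start_bit = s[:bit].count(' ')
--                 node_trans = [k for k in range(start_bit, start_bit + node_length)]
--                 node_trans_list.append(node_trans)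
--                 bit += 1
--
--     return node_trans_list
-- ===== SOURCE B (Python) =====
-- def get_keyword_seq(kw_list, s):
--     # Prefix space-count table: one O(1) lookup per occurrence instead of
--     # recounting spaces in s[:bit] for every hit.
--     prefix = [0]
--     n = 0
--     for ch in s:
--         n += ch == ' '
--         prefix.append(n)
--     out = []
--     for node in kw_list:
--         w = node.count(' ') - 1
--         p = s.find(node)
--         for _ in range(s.count(node)):
--             sp = prefix[p]
--             out.append(list(range(sp, sp + w)))
--             p = s.find(node, p + 1)
--     return out
-- ===== Notes on version B (the rewrite author's own statement) =====
-- stated objective: alternative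
-- what changed: B builds a prefix space-count table for s once and looks each occurrence's word index up in it, instead of A's slicing s[:bit] and recounting its spaces for every occurrence; the 'node in s' pre-test disappears (a zero count skips the loop).
import Mathlib
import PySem

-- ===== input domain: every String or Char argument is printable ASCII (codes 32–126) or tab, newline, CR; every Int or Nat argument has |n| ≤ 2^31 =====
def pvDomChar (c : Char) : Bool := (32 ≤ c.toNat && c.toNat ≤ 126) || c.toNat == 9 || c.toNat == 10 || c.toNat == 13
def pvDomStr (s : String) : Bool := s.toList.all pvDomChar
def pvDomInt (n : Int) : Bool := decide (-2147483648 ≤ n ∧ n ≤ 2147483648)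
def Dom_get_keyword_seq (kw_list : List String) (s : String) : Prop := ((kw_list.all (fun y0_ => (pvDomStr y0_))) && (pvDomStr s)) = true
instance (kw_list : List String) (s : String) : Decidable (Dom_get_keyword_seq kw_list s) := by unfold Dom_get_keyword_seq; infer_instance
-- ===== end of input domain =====

-- B replaces A's per-occurrence space recount of s[:bit] by a prefix space-count
-- table built once, with one lookup per occurrence (objective: alternative).

-- ===== PORT A =====
def get_keyword_seq (kw_list : List String) (s : String) : List (List Int) :=
  kw_list.foldl (fun node_trans_list node =>
    if PySem.Str.isIn node s = false then node_trans_list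
    else
      let node_length : Int := (PySem.Str.count node " " : Int) - 1
      ((PySem.List.pyRange 0 (PySem.Str.count s node : Int) 1).foldl
        (fun (st : List (List Int) × Int) _ =>
          let bit := PySem.Str.findFrom s node st.2
          let start_bit : Int := (PySem.Str.count (PySem.Str.slice s none (some bit)) " " : Int)
          let node_trans := PySem.List.pyRange start_bit (start_bit + node_length) 1
          (st.1 ++ [node_trans], bit + 1))
        (node_trans_list, 0)).1) []

-- ===== PORT B =====
-- prefix[i] = number of spaces among the first i characters of s (built once)
def pvPrefix (s : String) : List Int :=
  (s.toList.foldl (fun (acc : List Int × Int) ch =>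
      let n := acc.2 + (if ch = ' ' then (1 : Int) else 0)
      (acc.1 ++ [n], n)) ([0], 0)).1

-- the inner 'for _ in range(c)' loop of Source B, carrying the current hit position p
def pvSpansGo (s node : String) (pre : List Int) (w : Int) : Nat → Int → List (List Int)
  | 0, _ => []
  | r + 1, p =>
      let sp := PySem.List.pyGetD pre p 0
      PySem.List.pyRange sp (sp + w) 1 :: pvSpansGo s node pre w r (PySem.Str.findFrom s node (p + 1))

def get_keyword_seq_alt (kw_list : List String) (s : String) : List (List Int) :=
  let pre := pvPrefix s
  kw_list.flatMap (fun node =>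
    pvSpansGo s node pre ((PySem.Str.count node " " : Int) - 1)
      (PySem.Str.count s node) (PySem.Str.find s node))

-- ===== PRECONDITION & SPEC =====
def Spec_get_keyword_seq (kw_list : List String) (s : String) (out : List (List Int)) : Prop := out = get_keyword_seq_alt kw_list s
instance (kw_list : List String) (s : String) (out : List (List Int)) : Decidable (Spec_get_keyword_seq kw_list s out) := by unfold Spec_get_keyword_seq; infer_instance

-- ===== CLAIM (what is proved, stated in full; the proofs are below) =====
def Claim_equal_get_keyword_seq : Prop := ∀ (kw_list : List String) (s : String), Dom_get_keyword_seq kw_list s → Spec_get_keyword_seq kw_list s (get_keyword_seq kw_list s)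

-- ===== LEMMAS AND PROOFS =====

-- reference count of non-overlapping occurrences (proof-side mirror of PySem.Chars.count.go)
def pvCnt (sub : List Char) : List Char → Nat
  | [] => 0
  | c :: t =>
      if sub ≠ [] ∧ sub.isPrefixOf (c :: t) then pvCnt sub (t.drop (sub.length - 1)) + 1
      else pvCnt sub t
  termination_by l => l.length
  decreasing_by
  · simp only [List.length_cons, List.length_drop]; omega
  · simp only [List.length_cons]; omega

-- proof-side mirror of A's inner loop (the fold over pyRange ignores the loop variable)
def pvAIter (s node : String) (w : Int) : Nat → (List (List Int) × Int) → List (List Int)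
  | 0, st => st.1
  | r + 1, st =>
      let bit := PySem.Str.findFrom s node st.2
      let start_bit : Int := (PySem.Str.count (PySem.Str.slice s none (some bit)) " " : Int)
      pvAIter s node w r (st.1 ++ [PySem.List.pyRange start_bit (start_bit + w) 1], bit + 1)

lemma pvCount_go_eq (sub : List Char) (hsub : sub ≠ []) :
    ∀ (fuel : Nat) (l : List Char) (acc : Nat), l.length ≤ fuel →
      PySem.Chars.count.go sub fuel l acc = acc + pvCnt sub l := by
  intro fuel
  induction fuel with
  | zero =>
      intro l acc h
      have hl : l = [] := by cases l <;> simp_all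
      subst hl
      simp [PySem.Chars.count.go, pvCnt]
  | succ f ih =>
      intro l acc h
      cases l with
      | nil => simp [PySem.Chars.count.go, pvCnt]
      | cons c t =>
          rw [show PySem.Chars.count.go sub (f + 1) (c :: t) acc
              = (if sub.isPrefixOf (c :: t) then
                  PySem.Chars.count.go sub f (List.drop sub.length (c :: t)) (acc + 1)
                 else PySem.Chars.count.go sub f t acc) from rfl]
          obtain ⟨k, hk⟩ : ∃ k, sub.length = k + 1 := by
            cases sub with
            | nil => exact absurd rfl hsub
            | cons a b => exact ⟨b.length, rfl⟩
          by_cases hp : sub.isPrefixOf (c :: t)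
          · rw [if_pos hp]
            rw [show List.drop sub.length (c :: t) = List.drop (sub.length - 1) t by
              rw [hk]; simp]
            rw [ih _ _ (by simp only [List.length_drop]; simp only [List.length_cons] at h; omega)]
            rw [show pvCnt sub (c :: t) = pvCnt sub (t.drop (sub.length - 1)) + 1 by
              rw [pvCnt]; rw [if_pos ⟨hsub, hp⟩]]
            omega
          · rw [if_neg hp]
            rw [ih _ _ (by simp only [List.length_cons] at h; omega)]
            rw [show pvCnt sub (c :: t) = pvCnt sub t by
              rw [pvCnt]; rw [if_neg (by tauto)]]

lemma pvCount_eq_pvCnt (l sub : List Char) (hsub : sub ≠ []) :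
    PySem.Chars.count l sub = pvCnt sub l := by
  rw [show PySem.Chars.count l sub
      = if sub.isEmpty then l.length + 1 else PySem.Chars.count.go sub l.length l 0 from rfl]
  rw [if_neg (by simpa using hsub)]
  rw [pvCount_go_eq sub hsub l.length l 0 le_rfl]; omega

lemma pvCnt_mono (sub : List Char) :
    ∀ (n : Nat) (l : List Char), l.length ≤ n →
      (∀ j, pvCnt sub (l.drop j) ≤ pvCnt sub l) ∧
      (∀ j, j ≤ sub.length → pvCnt sub l ≤ pvCnt sub (l.drop j) + 1) := by
  intro n
  induction n with
  | zero =>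
      intro l h
      have hl : l = [] := by cases l <;> simp_all
      subst hl
      constructor <;> intro j <;> simp [pvCnt]
  | succ n ih =>
      intro l hl
      constructor
      · intro j
        cases j with
        | zero => simp
        | succ j =>
            cases l with
            | nil => simp
            | cons c t =>
                have ht : t.length ≤ n := by simp only [List.length_cons] at hl; omega
                have h1 : pvCnt sub (t.drop j) ≤ pvCnt sub t := (ih t ht).1 j
                have h2 : pvCnt sub t ≤ pvCnt sub (c :: t) := by
                  rw [pvCnt]
                  split
                  · have := (ih t ht).2 (sub.length - 1) (by omega)
                    omega
                  · exact le_rfl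
                calc pvCnt sub ((c :: t).drop (j + 1)) = pvCnt sub (t.drop j) := rfl
                  _ ≤ pvCnt sub t := h1
                  _ ≤ pvCnt sub (c :: t) := h2
      · intro j hj
        cases j with
        | zero => simp
        | succ j =>
            cases l with
            | nil => simp [pvCnt]
            | cons c t =>
                have ht : t.length ≤ n := by simp only [List.length_cons] at hl; omega
                rw [show (c :: t).drop (j + 1) = t.drop j from rfl]
                rw [pvCnt]
                split
                · rename_i hpre
                  have hd : t.drop (sub.length - 1) = (t.drop j).drop (sub.length - 1 - j) := by
                    rw [List.drop_drop]; congr 1; omega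
                  rw [hd]
                  have hlen : (t.drop j).length ≤ n := by simp only [List.length_drop]; omega
                  have := (ih (t.drop j) hlen).1 (sub.length - 1 - j)
                  omega
                · exact (ih t ht).2 j (by omega)

lemma pvCnt_first (sub : List Char) (hsub : sub ≠ []) :
    ∀ (q : Nat) (l : List Char), (∀ i < q, ¬ sub <+: l.drop i) → sub <+: l.drop q →
      pvCnt sub l = pvCnt sub (l.drop (q + sub.length)) + 1 := by
  intro q
  induction q with
  | zero =>
      intro l _ hq
      cases l with
      | nil =>
          exact absurd (List.prefix_nil.mp (by simpa using hq)) hsub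
      | cons c t =>
          rw [pvCnt, if_pos ⟨hsub, List.isPrefixOf_iff_prefix.mpr (by simpa using hq)⟩]
          congr 2
          obtain ⟨k, hk⟩ : ∃ k, sub.length = k + 1 := by
            cases sub with
            | nil => exact absurd rfl hsub
            | cons a b => exact ⟨b.length, rfl⟩
          rw [hk]; simp
  | succ q ih =>
      intro l hmin hq
      cases l with
      | nil =>
          rw [List.drop_nil] at hq
          exact absurd (List.prefix_nil.mp hq) hsub
      | cons c t =>
          have hnp : ¬ sub.isPrefixOf (c :: t) = true := by
            intro hp
            exact hmin 0 (by omega) (by simpa using List.isPrefixOf_iff_prefix.mp hp)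
          rw [pvCnt, if_neg (by tauto)]
          have := ih t (fun i hi => by simpa using hmin (i + 1) (by omega)) (by simpa using hq)
          simpa [Nat.succ_add] using this

lemma pvCnt_eq_zero (sub l : List Char) (h : ¬ sub <:+: l) : pvCnt sub l = 0 := by
  induction l with
  | nil => simp [pvCnt]
  | cons c t ih =>
      rw [pvCnt, if_neg]
      · exact ih (fun hi => h (hi.trans (List.suffix_cons c t).isInfix))
      · rintro ⟨-, hp⟩
        exact h (List.isPrefixOf_iff_prefix.mp hp).isInfix

lemma pvCnt_space (l : List Char) : pvCnt [' '] l = l.count ' ' := by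
  induction l with
  | nil => simp [pvCnt]
  | cons c t ih =>
      by_cases hc : c = ' '
      · rw [pvCnt, if_pos ⟨by simp, by simp [List.isPrefixOf, hc]⟩]
        simp only [List.length_cons, List.length_nil, Nat.zero_add, Nat.sub_self, List.drop_zero]
        rw [ih]
        simp [hc]
      · rw [pvCnt, if_neg (by simp [List.isPrefixOf]; intro h; exact absurd h.symm hc)]
        rw [ih]
        simp [hc]

lemma pvPrefixFold :
    ∀ (l : List Char) (pre : List Int) (n : Int),
      (l.foldl (fun (acc : List Int × Int) ch =>
          let m := acc.2 + (if ch = ' ' then (1 : Int) else 0)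
          (acc.1 ++ [m], m)) (pre, n)).1
        = pre ++ (List.range l.length).map (fun i => n + ((l.take (i + 1)).count ' ' : Int)) := by
  intro l
  induction l with
  | nil => intro pre n; simp
  | cons c t ih =>
      intro pre n
      rw [List.foldl_cons]
      show (t.foldl _ (pre ++ [n + (if c = ' ' then (1 : Int) else 0)],
          n + (if c = ' ' then (1 : Int) else 0))).1 = _
      rw [ih]
      rw [List.length_cons, List.range_succ_eq_map]
      rw [List.map_cons, List.map_map]
      rw [List.append_assoc]
      congr 1
      rw [List.singleton_append]
      congr 1
      · rw [List.take_succ_cons, List.take_zero, List.count_singleton]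
        by_cases hc : c = ' ' <;> simp [hc]
      · congr 1
        funext i
        simp only [Function.comp_apply, Nat.succ_eq_add_one, List.take_succ_cons, List.count_cons]
        by_cases hc : c = ' '
        · simp [hc]; ring
        · simp [hc]
lemma pvPrefix_get (s : String) (q : Nat) (hq : q ≤ s.toList.length) :
    PySem.List.pyGetD (pvPrefix s) (q : Int) 0 = ((s.toList.take q).count ' ' : Int) := by
  rw [PySem.List.pyGetD_natCast]
  unfold pvPrefix
  rw [pvPrefixFold]
  cases q with
  | zero => simp
  | succ q =>
      have hq' : q < s.toList.length := by omega
      rw [List.singleton_append, List.getD_cons_succ]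
      rw [List.getD_eq_getElem?_getD, List.getElem?_map, List.getElem?_range hq']
      simp

lemma pvFoldA (s node : String) (w : Int) :
    ∀ (l : List Int) (st : List (List Int) × Int),
      (l.foldl (fun (st : List (List Int) × Int) _ =>
          let bit := PySem.Str.findFrom s node st.2
          let start_bit : Int := (PySem.Str.count (PySem.Str.slice s none (some bit)) " " : Int)
          let node_trans := PySem.List.pyRange start_bit (start_bit + w) 1
          (st.1 ++ [node_trans], bit + 1)) st).1 = pvAIter s node w l.length st := by
  intro l
  induction l with
  | nil => intro st; rfl
  | cons x l ih =>
      intro st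
      rw [List.foldl_cons, List.length_cons, pvAIter]
      exact ih _

lemma pvLenRange (c : Nat) : (PySem.List.pyRange 0 (c : Int) 1).length = c := by
  rw [PySem.List.pyRange_of_pos _ _ one_pos, List.length_map, List.length_range]
  split_ifs with h
  · omega
  · omega

lemma pvRangeEmpty (a : Int) : PySem.List.pyRange a (a + -1) 1 = [] := by
  rw [PySem.List.pyRange_of_pos _ _ one_pos, if_neg (by omega)]
  simp

lemma pvInnerNeg_A (s node : String) :
    ∀ (r : Nat) (st : List (List Int) × Int),
      pvAIter s node (-1) r st = st.1 ++ List.replicate r [] := by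
  intro r
  induction r with
  | zero => intro st; simp [pvAIter]
  | succ r ih =>
      intro st
      rw [pvAIter]
      show pvAIter s node (-1) r (st.1 ++ [PySem.List.pyRange _ (_ + -1) 1], _) = _
      rw [pvRangeEmpty, ih]
      simp [List.replicate_succ]

lemma pvInnerNeg_B (s node : String) (pre : List Int) :
    ∀ (r : Nat) (p : Int), pvSpansGo s node pre (-1) r p = List.replicate r [] := by
  intro r
  induction r with
  | zero => intro p; rfl
  | succ r ih =>
      intro p
      rw [pvSpansGo]
      show PySem.List.pyRange _ (_ + -1) 1 :: _ = _
      rw [pvRangeEmpty, ih, List.replicate_succ]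

lemma pvInnerMain (s node : String) (hsub : node.toList ≠ []) (w : Int) :
    ∀ (r k : Nat), k ≤ s.toList.length → r ≤ pvCnt node.toList (s.toList.drop k) →
      ∀ acc, pvAIter s node w r (acc, (k : Int)) =
        acc ++ pvSpansGo s node (pvPrefix s) w r (PySem.Str.findFrom s node (k : Int)) := by
  intro r
  induction r with
  | zero => intro k hk hr acc; simp [pvAIter, pvSpansGo]
  | succ r ih =>
      intro k hk hr acc
      have hinf : node.toList <:+: s.toList.drop k := by
        by_contra hni
        rw [pvCnt_eq_zero _ _ hni] at hr; omega
      have hne : PySem.Chars.findFrom s.toList node.toList (k : Int) ≠ -1 := by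
        rw [Ne, PySem.Chars.findFrom_natCast_eq_neg_one_iff s.toList node.toList k hk]
        exact not_not_intro hinf
      obtain ⟨hge, hpre, hmin⟩ := PySem.Chars.findFrom_natCast_spec s.toList node.toList k hk hne
      have hbridge : PySem.Str.findFrom s node (k : Int)
          = PySem.Chars.findFrom s.toList node.toList (k : Int) := PySem.Str.findFrom_eq _ _ _ _
      set F := PySem.Chars.findFrom s.toList node.toList (k : Int) with hFdef
      have h0F : (0 : Int) ≤ F := le_trans (Int.natCast_nonneg k) hge
      set q := F.toNat with hqdef
      have hFq : F = (q : Int) := (Int.toNat_of_nonneg h0F).symm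
      have hkq : k ≤ q := by omega
      have hsl : 1 ≤ node.toList.length := List.length_pos_iff.mpr hsub
      have hqlen : q + 1 ≤ s.toList.length := by
        have hlen := hpre.length_le
        simp only [List.length_drop] at hlen
        omega
      -- the space count both sides compute at this hit
      have hSB : (PySem.Str.count (PySem.Str.slice s none (some (PySem.Str.findFrom s node (k : Int)))) " " : Int)
          = ((s.toList.take q).count ' ' : Int) := by
        rw [hbridge, PySem.Str.count_eq]
        rw [show (PySem.Str.slice s none (some F)).toList = PySem.List.slice s.toList none (some F) by
          simp [PySem.Str.slice, PySem.Chars.slice]]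
        rw [PySem.List.slice_to _ h0F]
        rw [show (" " : String).toList = [' '] from rfl]
        rw [pvCount_eq_pvCnt _ _ (by simp), pvCnt_space]
      have hSP : PySem.List.pyGetD (pvPrefix s) (PySem.Str.findFrom s node (k : Int)) 0
          = ((s.toList.take q).count ' ' : Int) := by
        rw [hbridge, hFq]
        exact pvPrefix_get s q (by omega)
      -- one step of each side
      rw [show pvAIter s node w (r + 1) (acc, (k : Int))
          = pvAIter s node w r
              (acc ++ [PySem.List.pyRange
                  (PySem.Str.count (PySem.Str.slice s none (some (PySem.Str.findFrom s node (k : Int)))) " " : Int)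
                  ((PySem.Str.count (PySem.Str.slice s none (some (PySem.Str.findFrom s node (k : Int)))) " " : Int) + w) 1],
               PySem.Str.findFrom s node (k : Int) + 1) from rfl]
      rw [show pvSpansGo s node (pvPrefix s) w (r + 1) (PySem.Str.findFrom s node (k : Int))
          = PySem.List.pyRange (PySem.List.pyGetD (pvPrefix s) (PySem.Str.findFrom s node (k : Int)) 0)
              (PySem.List.pyGetD (pvPrefix s) (PySem.Str.findFrom s node (k : Int)) 0 + w) 1
            :: pvSpansGo s node (pvPrefix s) w r
                (PySem.Str.findFrom s node (PySem.Str.findFrom s node (k : Int) + 1)) from rfl]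
      rw [hSB, hSP]
      -- remaining budget for the tail
      have hb : r ≤ pvCnt node.toList (s.toList.drop (q + 1)) := by
        have e1 : pvCnt node.toList (s.toList.drop k)
            = pvCnt node.toList (s.toList.drop (q + node.toList.length)) + 1 := by
          have h1 : ∀ i < q - k, ¬ node.toList <+: (s.toList.drop k).drop i := by
            intro i hi
            rw [List.drop_drop]
            exact hmin (k + i) (by omega) (by omega)
          have h2 : node.toList <+: (s.toList.drop k).drop (q - k) := by
            rw [List.drop_drop, show k + (q - k) = q by omega]
            exact hpre
          have := pvCnt_first node.toList hsub (q - k) (s.toList.drop k) h1 h2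
          rw [List.drop_drop, show k + (q - k + node.toList.length) = q + node.toList.length by omega] at this
          exact this
        have e2 : pvCnt node.toList (s.toList.drop (q + node.toList.length))
            ≤ pvCnt node.toList (s.toList.drop (q + 1)) := by
          rw [show q + node.toList.length = (q + 1) + (node.toList.length - 1) by omega,
              ← List.drop_drop]
          exact (pvCnt_mono node.toList (s.toList.drop (q + 1)).length _ le_rfl).1 _
        omega
      have hnext : PySem.Str.findFrom s node (k : Int) + 1 = ((q + 1 : Nat) : Int) := by
        rw [hbridge, hFq]; push_cast; ring
      rw [hnext]
      rw [ih (q + 1) hqlen hb]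
      simp [List.append_assoc]

def pvABody (s : String) (acc : List (List Int)) (node : String) : List (List Int) :=
  if PySem.Str.isIn node s = false then acc
  else
    let node_length : Int := (PySem.Str.count node " " : Int) - 1
    ((PySem.List.pyRange 0 (PySem.Str.count s node : Int) 1).foldl
      (fun (st : List (List Int) × Int) _ =>
        let bit := PySem.Str.findFrom s node st.2
        let start_bit : Int := (PySem.Str.count (PySem.Str.slice s none (some bit)) " " : Int)
        let node_trans := PySem.List.pyRange start_bit (start_bit + node_length) 1
        (st.1 ++ [node_trans], bit + 1))
      (acc, 0)).1

def pvBf (s : String) (node : String) : List (List Int) :=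
  pvSpansGo s node (pvPrefix s) ((PySem.Str.count node " " : Int) - 1)
    (PySem.Str.count s node) (PySem.Str.find s node)

lemma pvA_eq (kw_list : List String) (s : String) :
    get_keyword_seq kw_list s = kw_list.foldl (pvABody s) [] := rfl

lemma pvB_eq (kw_list : List String) (s : String) :
    get_keyword_seq_alt kw_list s = kw_list.flatMap (pvBf s) := rfl

lemma pvPerNode (s : String) (node : String) (acc : List (List Int)) :
    pvABody s acc node = acc ++ pvBf s node := by
  by_cases hin : PySem.Str.isIn node s = false
  · have hsub : node.toList ≠ [] := by
      intro h
      have ht : PySem.Str.isIn node s = true := by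
        rw [PySem.Str.isIn_eq, h]
        exact PySem.Chars.isIn_nil _
      rw [ht] at hin; cases hin
    have hc : PySem.Str.count s node = 0 := by
      rw [PySem.Str.count_eq, pvCount_eq_pvCnt _ _ hsub]
      exact pvCnt_eq_zero _ _ ((PySem.Chars.isIn_eq_false_iff _ _).mp (by rw [← PySem.Str.isIn_eq]; exact hin))
    rw [show pvABody s acc node = acc from by unfold pvABody; rw [if_pos hin]]
    rw [show pvBf s node = [] from by unfold pvBf; rw [hc]; rfl]
    simp
  · have hA : pvABody s acc node
        = pvAIter s node ((PySem.Str.count node " " : Int) - 1) (PySem.Str.count s node) (acc, 0) := by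
      unfold pvABody
      rw [if_neg hin]
      show ((PySem.List.pyRange 0 (PySem.Str.count s node : Int) 1).foldl _ (acc, 0)).1 = _
      rw [pvFoldA, pvLenRange]
    rw [hA]
    by_cases hemp : node.toList = []
    · have hw : (PySem.Str.count node " " : Int) - 1 = -1 := by
        rw [PySem.Str.count_eq, hemp]; decide
      rw [hw, pvInnerNeg_A]
      rw [show pvBf s node = List.replicate (PySem.Str.count s node) [] from by
        unfold pvBf; rw [hw]; exact pvInnerNeg_B s node (pvPrefix s) _ _]
    · have hcount : PySem.Str.count s node ≤ pvCnt node.toList (s.toList.drop 0) := by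
        rw [List.drop_zero, PySem.Str.count_eq, pvCount_eq_pvCnt _ _ hemp]
      have h := pvInnerMain s node hemp ((PySem.Str.count node " " : Int) - 1)
        (PySem.Str.count s node) 0 (Nat.zero_le _) hcount acc
      have hfind : PySem.Str.findFrom s node ((0 : Nat) : Int) = PySem.Str.find s node := by
        rw [PySem.Str.findFrom_eq, PySem.Str.find_eq, Nat.cast_zero]
        exact PySem.Chars.findFrom_zero _ _
      rw [hfind] at h
      rw [show ((0 : Nat) : Int) = (0 : Int) from rfl] at h
      rw [h]
      rfl

-- ===== VERDICT (by name: the statement is the Claim_ definition above) =====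
theorem get_keyword_seq_spec : Claim_equal_get_keyword_seq := by
  intro kw_list s _
  show get_keyword_seq kw_list s = get_keyword_seq_alt kw_list s
  rw [pvA_eq, pvB_eq]
  suffices h : ∀ (l : List String) (acc : List (List Int)),
      List.foldl (pvABody s) acc l = acc ++ List.flatMap (pvBf s) l by
    simpa using h kw_list []
  intro l
  induction l with
  | nil => intro acc; simp
  | cons n t ih =>
      intro acc
      rw [List.foldl_cons, pvPerNode, ih, List.flatMap_cons, List.append_assoc]
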